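-- pv_equiv track=rewrite | github.com/pramirez2328/python_projects | week5/homework_week5/prlara_hw_5_1.py | vc_counter
-- ===== SOURCE A (Python) =====
-- def vc_counter(my_file):
--     '''Counts the number of vowels and consonants in the file'''
--     vowels = 0
--     consonants = 0
--     VOWELS_STR = "AEIOU"
--     CONSONANTS_STR = "BCDFGHJKLMNPQRSTVWXYZ"
--     for line in my_file:
--         for char in line:
--             if char.upper() in VOWELS_STR:
--                 vowels += 1
--             elif char.upper() in CONSONANTS_STR:
--                 consonants += 1
--     return {'vowels': vowels, 'consonants': consonants}
-- ===== SOURCE B (Python) =====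
-- def vc_counter(my_file):
--     '''Counts the number of vowels and consonants in the file'''
--     counts = {}
--     for line in my_file:
--         for ch in line:
--             u = ch.upper()
--             counts[u] = counts.get(u, 0) + 1
--     vowels = sum(counts.get(c, 0) for c in "AEIOU")
--     consonants = sum(counts.get(c, 0) for c in "BCDFGHJKLMNPQRSTVWXYZ")
--     return {'vowels': vowels, 'consonants': consonants}
-- ===== Notes on version B (the rewrite author's own statement) =====
-- stated objective: idiomatic
-- what changed: Replaces the per-character if/elif branching scan by building one frequency table of uppercased characters and then summing that table over the fixed vowel and consonant alphabets.
import Mathlib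
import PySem

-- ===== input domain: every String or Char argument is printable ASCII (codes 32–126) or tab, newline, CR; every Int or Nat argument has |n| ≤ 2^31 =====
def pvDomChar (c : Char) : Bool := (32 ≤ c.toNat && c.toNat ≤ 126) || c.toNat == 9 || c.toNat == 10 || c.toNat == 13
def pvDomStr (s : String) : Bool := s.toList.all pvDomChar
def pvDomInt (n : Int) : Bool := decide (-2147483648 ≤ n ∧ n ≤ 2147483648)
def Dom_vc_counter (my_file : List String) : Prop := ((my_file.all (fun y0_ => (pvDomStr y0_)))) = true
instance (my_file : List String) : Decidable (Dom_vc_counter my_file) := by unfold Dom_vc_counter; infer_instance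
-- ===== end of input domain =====

-- B replaces A's per-character if/elif branching scan by building a frequency table of uppercased
-- characters and then summing it over the fixed vowel and consonant alphabets (idiomatic, same cost).


-- ===== PORT A =====
-- state (vowels, consonants); 'char.upper() in VOWELS_STR' is substring membership, PySem.Chars.isIn
def vc_counter (my_file : List String) : List (String × Int) :=
  let p : Int × Int :=
    my_file.foldl (fun acc line =>
      line.toList.foldl (fun (acc : Int × Int) c =>
        if PySem.Chars.isIn (PySem.Chars.upper [c]) "AEIOU".toList then (acc.1 + 1, acc.2)
        else if PySem.Chars.isIn (PySem.Chars.upper [c]) "BCDFGHJKLMNPQRSTVWXYZ".toList then (acc.1, acc.2 + 1)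
        else acc) acc) (0, 0)
  [("vowels", p.1), ("consonants", p.2)]

-- ===== PORT B =====
-- counts[u] = counts.get(u, 0) + 1 over every uppercased character; then two fixed-alphabet sums
def vc_counter_alt (my_file : List String) : List (String × Int) :=
  let counts : PySem.Dict (List Char) Int :=
    my_file.foldl (fun d line =>
      line.toList.foldl (fun (d : PySem.Dict (List Char) Int) c =>
        let u := PySem.Chars.upper [c]
        d.insert u (d.getD u 0 + 1)) d) PySem.Dict.empty
  let vowels : Int := ("AEIOU".toList.map (fun c => counts.getD [c] 0)).sum
  let consonants : Int := ("BCDFGHJKLMNPQRSTVWXYZ".toList.map (fun c => counts.getD [c] 0)).sum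
  [("vowels", vowels), ("consonants", consonants)]

-- ===== PRECONDITION & SPEC =====
def Spec_vc_counter (my_file : List String) (out : List (String × Int)) : Prop := out = vc_counter_alt my_file
instance (my_file : List String) (out : List (String × Int)) : Decidable (Spec_vc_counter my_file out) := by unfold Spec_vc_counter; infer_instance

-- ===== CLAIM (what is proved, stated in full; the proofs are below) =====
def Claim_equal_vc_counter : Prop := ∀ (my_file : List String), Dom_vc_counter my_file → Spec_vc_counter my_file (vc_counter my_file)

-- ===== LEMMAS AND PROOFS =====

-- A's fold over a character list adds the two countP's to the accumulator
theorem foldA_eq (cs : List Char) (v w : Int) :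
    cs.foldl (fun (acc : Int × Int) c =>
        if PySem.Chars.isIn (PySem.Chars.upper [c]) "AEIOU".toList then (acc.1 + 1, acc.2)
        else if PySem.Chars.isIn (PySem.Chars.upper [c]) "BCDFGHJKLMNPQRSTVWXYZ".toList then (acc.1, acc.2 + 1)
        else acc) (v, w)
    = (v + cs.countP (fun c => PySem.Chars.isIn (PySem.Chars.upper [c]) "AEIOU".toList),
       w + cs.countP (fun c => !PySem.Chars.isIn (PySem.Chars.upper [c]) "AEIOU".toList
              && PySem.Chars.isIn (PySem.Chars.upper [c]) "BCDFGHJKLMNPQRSTVWXYZ".toList)) := by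
  induction cs generalizing v w with
  | nil => simp
  | cons c cs ih =>
    by_cases hv : PySem.Chars.isIn (PySem.Chars.upper [c]) "AEIOU".toList = true
    · rw [List.foldl_cons, if_pos hv, ih]
      simp only [List.countP_cons, hv, Bool.not_true, Bool.false_and, if_true, if_false,
        Nat.add_zero, Prod.mk.injEq]
      push_cast
      exact ⟨by ring, by ring⟩
    · have hvf : PySem.Chars.isIn (PySem.Chars.upper [c]) "AEIOU".toList = false :=
        Bool.eq_false_iff.mpr hv
      by_cases hc : PySem.Chars.isIn (PySem.Chars.upper [c]) "BCDFGHJKLMNPQRSTVWXYZ".toList = true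
      · rw [List.foldl_cons, if_neg hv, if_pos hc, ih]
        simp only [List.countP_cons, hvf, hc, Bool.not_false, Bool.true_and, if_true, if_false,
          Nat.add_zero, Prod.mk.injEq]
        push_cast
        exact ⟨by ring, by ring⟩
      · have hcf : PySem.Chars.isIn (PySem.Chars.upper [c]) "BCDFGHJKLMNPQRSTVWXYZ".toList = false :=
          Bool.eq_false_iff.mpr hc
        rw [List.foldl_cons, if_neg hv, if_neg hc, ih]
        simp [List.countP_cons]
        exact ⟨by simpa using hvf, fun _ => by simpa using hcf⟩

-- singleton substring membership is element membership
theorem isIn_singleton (u : Char) (V : List Char) :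
    PySem.Chars.isIn [u] V = decide (u ∈ V) := by
  by_cases h : u ∈ V
  · simp [h]; exact (PySem.Chars.isIn_iff_infix _ _).2 ((List.singleton_infix_iff u V).2 h)
  · simp [h]; exact (PySem.Chars.isIn_eq_false_iff _ _).2 (fun hc => h ((List.singleton_infix_iff u V).1 hc))

-- a nodup indicator sum picks out membership
theorem sum_ite_mem (u : Char) (V : List Char) (hnd : V.Nodup) :
    (V.map (fun v => if u = v then (1 : Int) else 0)).sum = if u ∈ V then 1 else 0 := by
  induction V with
  | nil => simp
  | cons v V ih =>
    rcases List.nodup_cons.1 hnd with ⟨hv, hnd'⟩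
    by_cases h : u = v
    · subst h; simp [ih hnd', hv]
    · simp [h, ih hnd']

-- summing per-key counts over a nodup alphabet = counting membership of the uppercased char
theorem sum_counts (cs : List Char) (V : List Char) (hnd : V.Nodup) :
    (V.map (fun v => ((cs.map (fun c => PySem.Chars.upper [c])).count [v] : Int))).sum
    = (cs.countP (fun c => decide (PySem.Chars.upperChar c ∈ V)) : Int) := by
  induction cs with
  | nil => simp
  | cons c cs ih =>
    have hu : PySem.Chars.upper [c] = [PySem.Chars.upperChar c] := by simp [PySem.Chars.upper]
    simp only [List.map_cons, List.count_cons, List.countP_cons, hu]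
    push_cast
    rw [List.sum_map_add, ih]
    have : (V.map fun v => if [PySem.Chars.upperChar c] == [v] then (1:Int) else 0) = V.map fun v => if PySem.Chars.upperChar c = v then (1:Int) else 0 := by
      apply List.map_congr_left; intro v _; simp
    rw [this, sum_ite_mem _ _ hnd]
    by_cases h : PySem.Chars.upperChar c ∈ V <;> simp [h]

-- the two alphabets are disjoint, so A's 'elif' test equals plain consonant membership
theorem cons_pred_eq (c : Char) :
    (!PySem.Chars.isIn (PySem.Chars.upper [c]) "AEIOU".toList
      && PySem.Chars.isIn (PySem.Chars.upper [c]) "BCDFGHJKLMNPQRSTVWXYZ".toList)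
    = decide (PySem.Chars.upperChar c ∈ "BCDFGHJKLMNPQRSTVWXYZ".toList) := by
  have hu : PySem.Chars.upper [c] = [PySem.Chars.upperChar c] := by simp [PySem.Chars.upper]
  rw [hu, isIn_singleton, isIn_singleton]
  by_cases h : PySem.Chars.upperChar c ∈ "BCDFGHJKLMNPQRSTVWXYZ".toList
  · have hv : PySem.Chars.upperChar c ∉ "AEIOU".toList := by
      intro hmem
      have hm : PySem.Chars.upperChar c = 'A' ∨ PySem.Chars.upperChar c = 'E' ∨
          PySem.Chars.upperChar c = 'I' ∨ PySem.Chars.upperChar c = 'O' ∨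
          PySem.Chars.upperChar c = 'U' := by simpa using hmem
      rcases hm with h' | h' | h' | h' | h' <;> rw [h'] at h <;> exact absurd h (by decide)
    simp only [decide_eq_true h, decide_eq_false hv, Bool.not_false, Bool.true_and]
  · simp only [decide_eq_false h, Bool.and_false]

theorem vowel_pred_eq (c : Char) :
    PySem.Chars.isIn (PySem.Chars.upper [c]) "AEIOU".toList
    = decide (PySem.Chars.upperChar c ∈ "AEIOU".toList) := by
  have hu : PySem.Chars.upper [c] = [PySem.Chars.upperChar c] := by simp [PySem.Chars.upper]
  rw [hu, isIn_singleton]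

-- B's dict, built over a character list from d, is the counter of the uppercased characters
theorem foldB_eq (cs : List Char) :
    cs.foldl (fun (d : PySem.Dict (List Char) Int) c =>
        let u := PySem.Chars.upper [c]
        d.insert u (d.getD u 0 + 1)) PySem.Dict.empty
    = PySem.Dict.counter (cs.map (fun c => PySem.Chars.upper [c])) := by
  rw [← PySem.Dict.foldl_insert_getD_add_one_eq_counter, List.foldl_map]

-- ===== VERDICT (by name: the statement is the Claim_ definition above) =====
theorem vc_counter_spec : Claim_equal_vc_counter := by
  intro my_file _
  unfold Spec_vc_counter vc_counter vc_counter_alt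
  have hflat : ∀ {β : Type} (step : β → Char → β) (b : β),
      my_file.foldl (fun acc line => line.toList.foldl step acc) b
      = ((my_file.map String.toList).flatten).foldl step b := by
    intro β step b
    rw [List.foldl_flatten, List.foldl_map]
  rw [hflat, hflat]
  set cs := (my_file.map String.toList).flatten with hcs
  rw [foldA_eq, foldB_eq]
  have hV : ∀ v : Char, (PySem.Dict.counter (cs.map (fun c => PySem.Chars.upper [c]))).getD [v] 0
      = ((cs.map (fun c => PySem.Chars.upper [c])).count [v] : Int) := by
    intro v; exact PySem.Dict.getD_counter _ _
  simp only [hV]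
  rw [sum_counts cs "AEIOU".toList (by decide), sum_counts cs "BCDFGHJKLMNPQRSTVWXYZ".toList (by decide)]
  have h1 : List.countP (fun c => PySem.Chars.isIn (PySem.Chars.upper [c]) "AEIOU".toList) cs
      = List.countP (fun c => decide (PySem.Chars.upperChar c ∈ "AEIOU".toList)) cs :=
    List.countP_congr (fun c _ => by rw [vowel_pred_eq c])
  have h2 : List.countP (fun c => !PySem.Chars.isIn (PySem.Chars.upper [c]) "AEIOU".toList
        && PySem.Chars.isIn (PySem.Chars.upper [c]) "BCDFGHJKLMNPQRSTVWXYZ".toList) cs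
      = List.countP (fun c => decide (PySem.Chars.upperChar c ∈ "BCDFGHJKLMNPQRSTVWXYZ".toList)) cs :=
    List.countP_congr (fun c _ => by rw [cons_pred_eq c])
  rw [h1, h2]
  simp
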